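-- pv_equiv track=rewrite | github.com/SachaYT1/repetitor | Настя/23/kege15.py | f
-- ===== SOURCE A (Python) =====
-- def f(x, y):
--     if x > y:
--         return 0
--     if x == y:
--         return 1
--     if x % 10 == 9:
--         return f(x + 1, y) + f(x + 10, y)
--     else:
--         return f(x + 1, y) + f(x + 11, y)
-- ===== SOURCE B (Python) =====
-- def f(x, y):
--     if x > y:
--         return 0
--     dp = [1]  # dp[j] = number of paths from (i + 1 + j) to y, front = i + 1
--     i = y - 1
--     while i >= x:
--         k = 9 if i % 10 == 9 else 10
--         v = dp[0] + (dp[k] if k < len(dp) else 0)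
--         dp = [v] + dp
--         i -= 1
--     return dp[0]
-- ===== Notes on version B (the rewrite author's own statement) =====
-- stated objective: alternative
-- what changed: Replaced A's branching recursion with an iterative bottom-up dynamic program that walks i from y down to x, keeping a list of already-computed path counts and looking up the two successors instead of recomputing them; Pre_ excludes only spans y-x >= 998 where A raises RecursionError.
import Mathlib
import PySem

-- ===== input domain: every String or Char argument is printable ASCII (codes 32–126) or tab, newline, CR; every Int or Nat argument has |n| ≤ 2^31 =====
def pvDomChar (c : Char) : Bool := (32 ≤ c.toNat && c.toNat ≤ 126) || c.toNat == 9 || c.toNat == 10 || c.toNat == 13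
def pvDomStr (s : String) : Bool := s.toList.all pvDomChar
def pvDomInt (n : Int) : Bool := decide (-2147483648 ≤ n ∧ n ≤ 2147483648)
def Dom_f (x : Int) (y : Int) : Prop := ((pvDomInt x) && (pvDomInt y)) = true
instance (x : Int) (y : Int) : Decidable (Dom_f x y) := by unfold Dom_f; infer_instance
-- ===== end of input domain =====

-- B replaces A's branching recursion by a bottom-up list DP from y down to x, so each count is computed once.
-- ===== PORT A =====
def f (x : Int) (y : Int) : Int :=
  if x > y then 0
  else if x = y then 1
  else if PySem.Int.mod x 10 = 9 then f (x + 1) y + f (x + 10) y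
  else f (x + 1) y + f (x + 11) y
termination_by (y + 1 - x).toNat
decreasing_by all_goals omega

-- ===== PORT B =====
-- the while loop of Source B: dp holds the path counts for i+1 .. y (front = i+1), default 0 beyond y
def fAltLoop (x : Int) (i : Int) (dp : List Int) : List Int :=
  if i ≥ x then
    let k : Nat := if PySem.Int.mod i 10 = 9 then 9 else 10
    let v : Int := dp.getD 0 0 + dp.getD k 0
    fAltLoop x (i - 1) (v :: dp)
  else dp
termination_by (i + 1 - x).toNat
decreasing_by omega

def f_alt (x : Int) (y : Int) : Int :=
  if x > y then 0
  else (fAltLoop x (y - 1) [1]).getD 0 0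

-- ===== PRECONDITION & SPEC =====
-- Pre_ excludes inputs with y - x >= 998, on which A's depth-(y-x) chain of recursive calls
-- exceeds CPython's default recursion limit (1000) and A raises RecursionError.
def Pre_f (x : Int) (y : Int) : Prop := y - x < 998
instance (x : Int) (y : Int) : Decidable (Pre_f x y) := by unfold Pre_f; infer_instance
def pvWitness_f : Int × Int := (0, 5)

def Spec_f (x : Int) (y : Int) (out : Int) : Prop := out = f_alt x y
instance (x : Int) (y : Int) (out : Int) : Decidable (Spec_f x y out) := by unfold Spec_f; infer_instance

-- ===== CLAIM (what is proved, stated in full; the proofs are below) =====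
def Claim_equal_f : Prop := ∀ (x : Int) (y : Int), Dom_f x y → Pre_f x y → Spec_f x y (f x y)

-- ===== LEMMAS AND PROOFS =====

-- unfold one step of f when x < y
theorem f_step {x y : Int} (h : x < y) :
    f x y = (if PySem.Int.mod x 10 = 9 then f (x + 1) y + f (x + 10) y
             else f (x + 1) y + f (x + 11) y) := by
  rw [f]
  rw [if_neg (by omega), if_neg (by omega)]

theorem f_of_gt {x y : Int} (h : y < x) : f x y = 0 := by
  rw [f, if_pos h]

theorem f_of_eq {x y : Int} (h : x = y) : f x y = 1 := by
  rw [f, if_neg (by omega), if_pos h]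

-- loop invariant: if dp lists the values f (x+n+j) y (j = 0,1,…, default 0),
-- running the loop from i = x-1+n produces the values f (x+j) y.
theorem loop_inv (x y : Int) : ∀ (n : Nat) (dp : List Int),
    (x - 1 + n ≤ y - 1) →
    (∀ j : Nat, dp.getD j 0 = f (x + n + j) y) →
    ∀ j : Nat, (fAltLoop x (x - 1 + n) dp).getD j 0 = f (x + j) y := by
  intro n
  induction n with
  | zero =>
    intro dp _ hdp j
    rw [fAltLoop, if_neg (by omega)]
    simpa using hdp j
  | succ n ih =>
    intro dp hle hdp j
    rw [fAltLoop, if_pos (by push_cast; omega)]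
    have hi : x - 1 + (↑(n + 1) : Int) = x + n := by push_cast; omega
    have hlt : x + (n : Int) < y := by push_cast at hle; omega
    rw [hi, show x + (n : Int) - 1 = x - 1 + (n : Int) by ring]
    apply ih
    · omega
    · intro j'
      cases j' with
      | zero =>
        have h0 : dp[(0 : Nat)]?.getD 0 = f (x + ↑n + 1) y := by
          have h := hdp 0; simp only [List.getD] at h; push_cast at h
          rw [show x + ((n : Int) + 1) + 0 = x + ↑n + 1 by ring] at h; exact h
        have h9 : dp[(9 : Nat)]?.getD 0 = f (x + ↑n + 10) y := by
          have h := hdp 9; simp only [List.getD] at h; push_cast at h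
          rw [show x + ((n : Int) + 1) + 9 = x + ↑n + 10 by ring] at h; exact h
        have h10 : dp[(10 : Nat)]?.getD 0 = f (x + ↑n + 11) y := by
          have h := hdp 10; simp only [List.getD] at h; push_cast at h
          rw [show x + ((n : Int) + 1) + 10 = x + ↑n + 11 by ring] at h; exact h
        simp only [List.getD, List.getElem?_cons_zero, Option.getD_some, Nat.cast_zero, add_zero]
        rw [f_step hlt]
        split_ifs with hm
        · rw [h0, h9]
        · rw [h0, h10]
      | succ j' =>
        have h := hdp j'
        simp only [List.getD, List.getElem?_cons_succ] at h ⊢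
        push_cast at h ⊢
        rw [h, show x + ((n : Int) + 1) + ↑j' = x + ↑n + (↑j' + 1) by ring]

theorem f_eq_alt (x y : Int) : f x y = f_alt x y := by
  unfold f_alt
  split_ifs with h
  · exact f_of_gt h
  · -- x ≤ y
    have hn : y - 1 = x - 1 + ((y - x).toNat : Int) := by omega
    rw [hn]
    have := loop_inv x y (y - x).toNat [1] (by omega) ?_ 0
    · rw [this]; push_cast; ring_nf
    · intro j
      cases j with
      | zero =>
        simp only [List.getD, List.getElem?_cons_zero, Option.getD_some]
        rw [f_of_eq (by omega)]
      | succ j =>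
        simp only [List.getD, List.getElem?_cons_succ, List.getElem?_nil, Option.getD_none]
        rw [f_of_gt (by omega)]

-- ===== VERDICT =====
theorem f_spec : Claim_equal_f := by
  intro x y _ _
  unfold Spec_f
  exact f_eq_alt x y
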